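-- pv_equiv track=rewrite | github.com/ciarrocki/LibreLaw | OPparser/OPparser_lawbox.py | frontFromCourt
-- ===== SOURCE A (Python) =====
-- def frontFromCourt(fullText):
--
--     for i, para in enumerate(fullText.split('<p>')):
--         if 'Superior Court of Pennsylvania' in para:
--             return i + 1
--         if 'Supreme Court of Pennsylvania' in para:
--             return i + 1
--         if 'Commonwealth Court of Pennsylvania' in para:
--             return i + 1
--         if 'Court of Judicial Discipline of Pennsylvania' in para:
--             return i + 1
--         if 'Court of Chancery of Delaware' in para:
--             return i + 1
--         if 'Superior Court of Delaware' in para: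
--             return i + 1
--         if 'Supreme Court of Delaware' in para:
--             return i + 1
--         if 'Family Court of Delaware' in para:
--             return i + 1
--         if 'Delaware Court on the Judiciary' in para:
--             return i + 1
--         if 'Court on the Judiciary of Delaware' in para:
--             return i + 1
--         if ('United States District Court, E.D. Pennsylvania' in para) or ('United States District Court, E. D. Pennsylvania' in para) or ('United States District Court E. D. Pennsylvania' in para) or ('United States District Court, E. D. Pa.' in para) or ('District Court, E. D. Pennsylvania' in para):
--             return i + 1
--         if ('United States District Court, D. Delaware' in para) or ('District Court, D. Delaware' in para) or ('United States District Court D. Delaware' in para):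
--             return i + 1
--
--     return -1 # Returns -1 if this fails
-- ===== SOURCE B (Python) =====
-- COURT_NAMES = [
--     'Superior Court of Pennsylvania',
--     'Supreme Court of Pennsylvania',
--     'Commonwealth Court of Pennsylvania',
--     'Court of Judicial Discipline of Pennsylvania',
--     'Court of Chancery of Delaware',
--     'Superior Court of Delaware',
--     'Supreme Court of Delaware',
--     'Family Court of Delaware',
--     'Delaware Court on the Judiciary',
--     'Court on the Judiciary of Delaware',
--     'United States District Court, E.D. Pennsylvania',
--     'United States District Court, E. D. Pennsylvania',
--     'United States District Court E. D. Pennsylvania',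
--     'United States District Court, E. D. Pa.',
--     'District Court, E. D. Pennsylvania',
--     'United States District Court, D. Delaware',
--     'District Court, D. Delaware',
--     'United States District Court D. Delaware',
-- ]
--
-- def frontFromCourt(fullText):
--     # earliest position in fullText where any court name occurs
--     best = -1
--     for name in COURT_NAMES:
--         p = fullText.find(name)
--         if p != -1 and (best == -1 or p < best):
--             best = p
--     if best == -1:
--         return -1
--     # 1-based index of the paragraph containing that position
--     return fullText[:best].count('<p>') + 1
-- ===== Notes on version B (the rewrite author's own statement) =====
-- stated objective: alternative
-- what changed: B never splits the text into paragraphs: it takes the minimum str.find position of the 18 court-name literals over the whole text and, if one occurs, returns the number of paragraph separators in the prefix before that position plus 1, replacing A's paragraph-by-paragraph membership scan with per-pattern whole-text searches plus one prefix separator count.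
import Mathlib
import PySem

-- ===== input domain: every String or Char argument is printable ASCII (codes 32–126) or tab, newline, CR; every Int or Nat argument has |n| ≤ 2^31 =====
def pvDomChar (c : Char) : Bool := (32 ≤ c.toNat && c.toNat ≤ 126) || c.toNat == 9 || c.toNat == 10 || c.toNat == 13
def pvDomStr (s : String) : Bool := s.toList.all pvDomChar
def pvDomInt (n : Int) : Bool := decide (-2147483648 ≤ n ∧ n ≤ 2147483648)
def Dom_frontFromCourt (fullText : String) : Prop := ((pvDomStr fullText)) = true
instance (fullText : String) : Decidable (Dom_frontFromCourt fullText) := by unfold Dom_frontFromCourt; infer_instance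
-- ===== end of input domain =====

-- B replaces A's paragraph-by-paragraph membership scan with whole-text find positions
-- (minimum over the court names) plus one separator count on the prefix; objective: alternative.

-- ===== PORT A =====
-- the loop body of A: scan enumerate(fullText.split('<p>')), early return i+1 on any court name
def frontFromCourtGo : List (Int × List Char) → Int
  | [] => -1
  | (i, para) :: rest =>
    if PySem.Chars.isIn "Superior Court of Pennsylvania".toList para then i + 1
    else if PySem.Chars.isIn "Supreme Court of Pennsylvania".toList para then i + 1
    else if PySem.Chars.isIn "Commonwealth Court of Pennsylvania".toList para then i + 1
    else if PySem.Chars.isIn "Court of Judicial Discipline of Pennsylvania".toList para then i + 1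
    else if PySem.Chars.isIn "Court of Chancery of Delaware".toList para then i + 1
    else if PySem.Chars.isIn "Superior Court of Delaware".toList para then i + 1
    else if PySem.Chars.isIn "Supreme Court of Delaware".toList para then i + 1
    else if PySem.Chars.isIn "Family Court of Delaware".toList para then i + 1
    else if PySem.Chars.isIn "Delaware Court on the Judiciary".toList para then i + 1
    else if PySem.Chars.isIn "Court on the Judiciary of Delaware".toList para then i + 1
    else if (PySem.Chars.isIn "United States District Court, E.D. Pennsylvania".toList para
          || PySem.Chars.isIn "United States District Court, E. D. Pennsylvania".toList para
          || PySem.Chars.isIn "United States District Court E. D. Pennsylvania".toList para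
          || PySem.Chars.isIn "United States District Court, E. D. Pa.".toList para
          || PySem.Chars.isIn "District Court, E. D. Pennsylvania".toList para) then i + 1
    else if (PySem.Chars.isIn "United States District Court, D. Delaware".toList para
          || PySem.Chars.isIn "District Court, D. Delaware".toList para
          || PySem.Chars.isIn "United States District Court D. Delaware".toList para) then i + 1
    else frontFromCourtGo rest

def frontFromCourt (fullText : String) : Int :=
  frontFromCourtGo (PySem.List.enumerate (PySem.Chars.splitOn fullText.toList "<p>".toList))

-- ===== PORT B =====
def pvCourtNames : List String :=
  [ "Superior Court of Pennsylvania"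
  , "Supreme Court of Pennsylvania"
  , "Commonwealth Court of Pennsylvania"
  , "Court of Judicial Discipline of Pennsylvania"
  , "Court of Chancery of Delaware"
  , "Superior Court of Delaware"
  , "Supreme Court of Delaware"
  , "Family Court of Delaware"
  , "Delaware Court on the Judiciary"
  , "Court on the Judiciary of Delaware"
  , "United States District Court, E.D. Pennsylvania"
  , "United States District Court, E. D. Pennsylvania"
  , "United States District Court E. D. Pennsylvania"
  , "United States District Court, E. D. Pa."
  , "District Court, E. D. Pennsylvania"
  , "United States District Court, D. Delaware"
  , "District Court, D. Delaware"
  , "United States District Court D. Delaware" ]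

def frontFromCourt_alt (fullText : String) : Int :=
  let best := pvCourtNames.foldl
    (fun best name =>
      let p := PySem.Str.find fullText name
      if p ≠ -1 ∧ (best = -1 ∨ p < best) then p else best) (-1)
  if best = -1 then -1
  else (PySem.Str.count (PySem.Str.slice fullText none (some best)) "<p>" : Int) + 1

-- ===== PRECONDITION & SPEC =====
def Spec_frontFromCourt (fullText : String) (out : Int) : Prop := out = frontFromCourt_alt fullText
instance (fullText : String) (out : Int) : Decidable (Spec_frontFromCourt fullText out) := by unfold Spec_frontFromCourt; infer_instance

-- ===== CLAIM (what is proved, stated in full; the proofs are below) =====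
def Claim_equal_frontFromCourt : Prop := ∀ (fullText : String), Dom_frontFromCourt fullText → Spec_frontFromCourt fullText (frontFromCourt fullText)

-- ===== LEMMAS AND PROOFS =====

-- proof-side abbreviations
def pvSep : List Char := ['<', 'p', '>']
def pvPats : List (List Char) := pvCourtNames.map String.toList

-- structural version of Python str.find (position as Option Nat)
def pvOFind (s pat : List Char) : Option Nat :=
  match s with
  | [] => if pat.isEmpty then some 0 else none
  | _ :: t => if pat.isPrefixOf s then some 0 else (pvOFind t pat).map (· + 1)

-- earliest position where any pattern of P starts
def pvFh (P : List (List Char)) (s : List Char) : Option Nat :=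
  match s with
  | [] => if P.any (fun p => p.isPrefixOf []) then some 0 else none
  | _ :: t => if P.any (fun p => p.isPrefixOf s) then some 0 else (pvFh P t).map (· + 1)

def pvOmin (a b : Option Nat) : Option Nat :=
  match a, b with
  | none, b => b
  | a, none => a
  | some n, some m => some (min n m)

def pvEnc : Option Nat → Int
  | none => -1
  | some n => (n : Int)

def pvMinPos (Q : List (List Char)) (s : List Char) : Option Nat :=
  Q.foldl (fun acc q => pvOmin acc (pvOFind s q)) none

def pvConsHead (x : List Char) : List (List Char) → List (List Char)
  | [] => [x]
  | h :: t => (x ++ h) :: t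

def pvAnyPat (para : List Char) : Bool := pvPats.any (fun pat => PySem.Chars.isIn pat para)

-- the properties of the court-name literals the equivalence depends on:
-- nonempty, no '<' inside, and not starting with 'p' or '>' (so an occurrence
-- can never overlap a '<p>' separator occurrence)
lemma pvPats_ok : ∀ pat ∈ pvPats, pat ≠ [] ∧ '<' ∉ pat ∧ pat.head? ≠ some 'p' ∧ pat.head? ≠ some '>' := by
  decide

lemma pvFindGo (pat : List Char) : ∀ (s : List Char) (k : Nat),
    PySem.Chars.find.go pat s k = match pvOFind s pat with
      | none => -1
      | some p => ((k + p : Nat) : Int) := by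
  intro s
  induction s with
  | nil =>
    intro k
    simp only [PySem.Chars.find.go, pvOFind]
    by_cases h : pat.isEmpty <;> simp [h]
  | cons c t ih =>
    intro k
    rw [PySem.Chars.find.go]
    by_cases h : pat.isPrefixOf (c :: t)
    · simp [pvOFind, h]
    · simp only [pvOFind, h, if_neg, if_false, Bool.false_eq_true, ih (k+1)]
      cases hof : pvOFind t pat <;> simp <;> push_cast <;> ring

lemma pvFind_eq (s pat : List Char) : PySem.Chars.find s pat = pvEnc (pvOFind s pat) := by
  rw [PySem.Chars.find, pvFindGo]
  cases h : pvOFind s pat <;> simp [pvEnc]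

lemma pvFoldStep (s : List Char) (q : List Char) (ob : Option Nat) :
    (if pvEnc (pvOFind s q) ≠ -1 ∧ (pvEnc ob = -1 ∨ pvEnc (pvOFind s q) < pvEnc ob)
      then pvEnc (pvOFind s q) else pvEnc ob) = pvEnc (pvOmin ob (pvOFind s q)) := by
  cases hf : pvOFind s q <;> cases hb : ob <;> simp [pvEnc, pvOmin] <;>
    first
    | omega
    | (rename_i n m
       by_cases h : (m : Int) < n <;> simp [h] <;> omega)

lemma pvOmin_assoc (a b c : Option Nat) : pvOmin (pvOmin a b) c = pvOmin a (pvOmin b c) := by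
  cases a <;> cases b <;> cases c <;> simp [pvOmin, Nat.min_assoc]

lemma pvOmin_zero (b : Option Nat) : pvOmin (some 0) b = some 0 := by
  cases b <;> rfl

lemma pvFold_eq (s : List Char) : ∀ (Q : List (List Char)) (ob : Option Nat),
    Q.foldl (fun best q =>
      if pvEnc (pvOFind s q) ≠ -1 ∧ (best = -1 ∨ pvEnc (pvOFind s q) < best)
      then pvEnc (pvOFind s q) else best) (pvEnc ob)
    = pvEnc (Q.foldl (fun acc q => pvOmin acc (pvOFind s q)) ob) := by
  intro Q
  induction Q with
  | nil => intro ob; rfl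
  | cons q Q ih =>
    intro ob
    simp only [List.foldl_cons]
    rw [pvFoldStep s q ob, ih]

lemma pvFoldlOmin_pull (s : List Char) (Q : List (List Char)) : ∀ (a b : Option Nat),
    Q.foldl (fun acc q => pvOmin acc (pvOFind s q)) (pvOmin a b)
    = pvOmin a (Q.foldl (fun acc q => pvOmin acc (pvOFind s q)) b) := by
  induction Q with
  | nil => intro a b; rfl
  | cons q Q ih =>
    intro a b
    simp only [List.foldl_cons]
    rw [pvOmin_assoc, ih]

lemma pvMinPos_cons (q : List Char) (Q : List (List Char)) (s : List Char) :
    pvMinPos (q :: Q) s = pvOmin (pvOFind s q) (pvMinPos Q s) := by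
  unfold pvMinPos
  simp only [List.foldl_cons]
  have h1 : pvOmin none (pvOFind s q) = pvOmin (pvOFind s q) none := by
    cases pvOFind s q <;> rfl
  rw [h1, pvFoldlOmin_pull]

lemma pvMinPos_eq_fh (P : List (List Char)) : ∀ (s : List Char), pvMinPos P s = pvFh P s := by
  intro s
  induction s with
  | nil =>
    induction P with
    | nil => rfl
    | cons q Q ih =>
      rw [pvMinPos_cons, ih]
      simp only [pvFh, List.any_cons, pvOFind]
      by_cases hq : q.isPrefixOf [] <;> by_cases hQ : Q.any (fun p => p.isPrefixOf []) <;>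
        simp [hq, hQ, pvOmin, List.isEmpty_iff, List.prefix_nil] <;>
        simp_all [List.isEmpty_iff, List.prefix_nil, List.isPrefixOf_iff_prefix]
  | cons c t ih =>
    -- lemma: minPos on cons
    have key : ∀ (Q : List (List Char)), pvMinPos Q (c :: t)
        = if Q.any (fun p => p.isPrefixOf (c :: t)) then some 0 else (pvMinPos Q t).map (· + 1) := by
      intro Q
      induction Q with
      | nil => simp [pvMinPos]
      | cons q Q ihq =>
        rw [pvMinPos_cons, ihq, pvMinPos_cons]
        by_cases hq : q.isPrefixOf (c :: t)
        · simp only [pvOFind, hq, if_pos, List.any_cons, Bool.true_or, if_pos rfl]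
          rw [pvOmin_zero]
        · simp only [pvOFind, hq, List.any_cons, Bool.false_or, if_neg, Bool.false_eq_true, if_false]
          by_cases hQ : Q.any (fun p => p.isPrefixOf (c :: t))
          · simp only [hQ, if_pos]
            cases hmf : pvOFind t q <;> simp [pvOmin]
          · simp only [hQ, if_neg, Bool.false_eq_true, if_false]
            cases hmf : pvOFind t q <;> cases hmp : pvMinPos Q t <;> simp [pvOmin]
    rw [key, pvFh]
    by_cases hA : (c :: t).isPrefixOf (c :: t) = true
    · by_cases h : List.any P (fun p => p.isPrefixOf (c :: t)) <;> simp [h, ih]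
    · simp at hA

lemma pvGo_acc : ∀ (fuel : Nat) (l cur : List Char) (acc : List (List Char)),
    PySem.Chars.splitOn.go pvSep fuel l cur acc
    = acc.reverse ++ PySem.Chars.splitOn.go pvSep fuel l cur [] := by
  intro fuel
  induction fuel with
  | zero => intro l cur acc; simp [PySem.Chars.splitOn.go]
  | succ f ih =>
    intro l cur acc
    cases l with
    | nil => simp [PySem.Chars.splitOn.go]
    | cons c rest =>
      rw [PySem.Chars.splitOn.go, PySem.Chars.splitOn.go]
      by_cases h : pvSep.isPrefixOf (c :: rest)
      · simp only [h, if_pos]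
        rw [ih _ _ (cur.reverse :: acc), ih _ _ ([cur.reverse])]
        simp
      · simp only [h, if_neg, Bool.false_eq_true, if_false]
        exact ih _ _ acc

lemma pvGo_cur : ∀ (fuel : Nat) (l cur : List Char),
    PySem.Chars.splitOn.go pvSep fuel l cur []
    = pvConsHead cur.reverse (PySem.Chars.splitOn.go pvSep fuel l [] []) := by
  intro fuel
  induction fuel with
  | zero => intro l cur; simp [PySem.Chars.splitOn.go, pvConsHead]
  | succ f ih =>
    intro l cur
    cases l with
    | nil => simp [PySem.Chars.splitOn.go, pvConsHead]
    | cons c rest =>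
      rw [PySem.Chars.splitOn.go, PySem.Chars.splitOn.go]
      by_cases h : pvSep.isPrefixOf (c :: rest)
      · simp only [h, if_pos]
        rw [pvGo_acc _ _ _ ([cur.reverse]), pvGo_acc _ _ _ ([List.reverse []])]
        simp [pvConsHead]
      · simp only [h, if_neg, Bool.false_eq_true, if_false]
        rw [ih rest (c :: cur), ih rest [c]]
        cases hG : PySem.Chars.splitOn.go pvSep f rest [] [] <;> simp [pvConsHead]

lemma pvGo_fuel : ∀ (f1 : Nat) (l : List Char) (f2 : Nat) (cur : List Char) (acc : List (List Char)),
    l.length < f1 → l.length < f2 →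
    PySem.Chars.splitOn.go pvSep f1 l cur acc = PySem.Chars.splitOn.go pvSep f2 l cur acc := by
  intro f1
  induction f1 with
  | zero => intro l f2 cur acc h1; omega
  | succ f ih =>
    intro l f2 cur acc h1 h2
    cases l with
    | nil =>
      cases f2 with
      | zero => omega
      | succ g => simp [PySem.Chars.splitOn.go]
    | cons c rest =>
      cases f2 with
      | zero => omega
      | succ g =>
        rw [PySem.Chars.splitOn.go, PySem.Chars.splitOn.go]
        by_cases h : pvSep.isPrefixOf (c :: rest)
        · simp only [h, if_pos]
          have hlen : pvSep.length ≤ (c :: rest).length := by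
            have := List.IsPrefix.length_le (List.isPrefixOf_iff_prefix.mp h)
            exact this
          apply ih <;> simp_all [pvSep] <;> omega
        · simp only [h, if_neg, Bool.false_eq_true, if_false]
          apply ih <;> simp_all <;> omega

lemma pvSplit_nil : PySem.Chars.splitOn [] pvSep = [[]] := by rfl

lemma pvSplit_sep (s : List Char) (h : pvSep.isPrefixOf s) :
    PySem.Chars.splitOn s pvSep = [] :: PySem.Chars.splitOn (s.drop 3) pvSep := by
  have hpre := List.isPrefixOf_iff_prefix.mp h
  have hlen : 3 ≤ s.length := by
    have := hpre.length_le; simpa [pvSep] using this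
  obtain ⟨c, rest, rfl⟩ : ∃ c rest, s = c :: rest := by
    cases s with
    | nil => simp at hlen
    | cons a b => exact ⟨a, b, rfl⟩
  rw [PySem.Chars.splitOn, PySem.Chars.splitOn]
  rw [PySem.Chars.splitOn.go]
  simp only [h, if_pos]
  rw [pvGo_acc]
  simp only [List.reverse_cons, List.reverse_nil, List.nil_append, List.cons_append,
    List.singleton_append]
  congr 1
  simp only [show pvSep.length = 3 from rfl, List.drop_succ_cons]
  apply pvGo_fuel <;> simp <;> omega

lemma pvSplit_cons (c : Char) (t : List Char) (h : ¬ pvSep.isPrefixOf (c :: t)) :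
    PySem.Chars.splitOn (c :: t) pvSep = pvConsHead [c] (PySem.Chars.splitOn t pvSep) := by
  rw [PySem.Chars.splitOn, PySem.Chars.splitOn]
  rw [PySem.Chars.splitOn.go]
  simp only [h, if_neg, Bool.false_eq_true, if_false]
  rw [pvGo_cur]
  simp

lemma pvSplit_ne_nil (s : List Char) : PySem.Chars.splitOn s pvSep ≠ [] := by
  rw [PySem.Chars.splitOn, pvGo_cur]
  cases PySem.Chars.splitOn.go pvSep (s.length + 1) s [] [] <;> simp [pvConsHead]

lemma pvSplit_head : ∀ (n : Nat) (s : List Char), s.length = n → ∀ (h : List Char) (rest : List (List Char)),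
    PySem.Chars.splitOn s pvSep = h :: rest →
    h <+: s ∧ (rest = [] → h = s) ∧ (rest ≠ [] → pvSep.isPrefixOf (s.drop h.length)) := by
  intro n
  induction n using Nat.strong_induction_on with
  | _ n ih =>
    intro s hlen h rest hs
    by_cases hsep : pvSep.isPrefixOf s
    · rw [pvSplit_sep s hsep] at hs
      obtain ⟨rfl, rfl⟩ : h = [] ∧ rest = PySem.Chars.splitOn (s.drop 3) pvSep := by
        cases hs; exact ⟨rfl, rfl⟩
      refine ⟨List.nil_prefix, ?_, ?_⟩
      · intro hrest; exact absurd hrest (pvSplit_ne_nil _)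
      · intro _; simpa using hsep
    · cases s with
      | nil =>
        rw [pvSplit_nil] at hs
        cases hs
        exact ⟨List.nil_prefix, fun _ => rfl, fun hr => absurd rfl hr⟩
      | cons c t =>
        rw [pvSplit_cons c t hsep] at hs
        cases hsp : PySem.Chars.splitOn t pvSep with
        | nil => exact absurd hsp (pvSplit_ne_nil t)
        | cons h' rest' =>
          rw [hsp] at hs
          simp only [pvConsHead, List.cons.injEq] at hs
          obtain ⟨rfl, rfl⟩ := hs
          have iht := ih t.length (by simp [← hlen]) t rfl h' rest' hsp
          refine ⟨?_, ?_, ?_⟩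
          · exact List.cons_prefix_cons.mpr ⟨rfl, iht.1⟩
          · intro hr; simp [iht.2.1 hr]
          · intro hr
            have := iht.2.2 hr
            simpa using this

-- ---- count ----
lemma pvCountGo_acc (sub : List Char) : ∀ (fuel : Nat) (l : List Char) (acc : Nat),
    PySem.Chars.count.go sub fuel l acc = acc + PySem.Chars.count.go sub fuel l 0 := by
  intro fuel
  induction fuel with
  | zero => intro l acc; simp [PySem.Chars.count.go]
  | succ f ih =>
    intro l acc
    cases l with
    | nil => simp [PySem.Chars.count.go]
    | cons c rest =>
      rw [PySem.Chars.count.go, PySem.Chars.count.go]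
      by_cases h : sub.isPrefixOf (c :: rest)
      · simp only [h, if_pos]
        rw [ih _ (acc + 1), ih _ (0 + 1)]
        omega
      · simp only [h, Bool.false_eq_true, if_false]
        exact ih _ acc

lemma pvCountGo_fuel (sub : List Char) (hsub : sub ≠ []) :
    ∀ (f1 : Nat) (l : List Char) (f2 : Nat) (acc : Nat),
    l.length ≤ f1 → l.length ≤ f2 →
    PySem.Chars.count.go sub f1 l acc = PySem.Chars.count.go sub f2 l acc := by
  intro f1
  induction f1 with
  | zero =>
    intro l f2 acc h1 _
    have : l = [] := by cases l <;> simp_all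
    subst this
    cases f2 <;> simp [PySem.Chars.count.go]
  | succ f ih =>
    intro l f2 acc h1 h2
    cases l with
    | nil =>
      cases f2 <;> simp [PySem.Chars.count.go]
    | cons c rest =>
      cases f2 with
      | zero => simp at h2
      | succ g =>
        rw [PySem.Chars.count.go, PySem.Chars.count.go]
        by_cases h : sub.isPrefixOf (c :: rest)
        · simp only [h, if_pos]
          have hlen : 1 ≤ sub.length := by
            cases sub with | nil => exact absurd rfl hsub | cons a b => simp
          apply ih <;> simp_all <;> omega
        · simp only [h, Bool.false_eq_true, if_false]
          apply ih <;> simp_all <;> omega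

lemma pvCount_nil : PySem.Chars.count [] pvSep = 0 := by rfl

lemma pvCount_sep (s : List Char) (h : pvSep.isPrefixOf s) :
    PySem.Chars.count s pvSep = PySem.Chars.count (s.drop 3) pvSep + 1 := by
  have hpre := List.isPrefixOf_iff_prefix.mp h
  have hlen : 3 ≤ s.length := by simpa [pvSep] using hpre.length_le
  obtain ⟨c, rest, rfl⟩ : ∃ c rest, s = c :: rest := by
    cases s with
    | nil => simp at hlen
    | cons a b => exact ⟨a, b, rfl⟩
  rw [PySem.Chars.count, PySem.Chars.count]
  simp only [show pvSep.isEmpty = false from rfl, Bool.false_eq_true, if_false,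
    List.length_cons]
  rw [PySem.Chars.count.go]
  simp only [h, if_pos]
  rw [pvCountGo_acc, show pvSep.length = 3 from rfl]
  have heq : PySem.Chars.count.go pvSep rest.length (List.drop 3 (c :: rest)) 0
       = PySem.Chars.count.go pvSep ((List.drop 3 (c :: rest)).length) (List.drop 3 (c :: rest)) 0 := by
    apply pvCountGo_fuel pvSep (by simp [pvSep]) <;> simp
  rw [heq]
  omega

lemma pvCount_cons (c : Char) (t : List Char) (h : ¬ pvSep.isPrefixOf (c :: t)) :
    PySem.Chars.count (c :: t) pvSep = PySem.Chars.count t pvSep := by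
  rw [PySem.Chars.count, PySem.Chars.count]
  simp only [show pvSep.isEmpty = false from rfl, Bool.false_eq_true, if_false,
    List.length_cons]
  rw [PySem.Chars.count.go]
  simp only [h, Bool.false_eq_true, if_false]

-- isIn on cons
lemma pvIsIn_cons (pat : List Char) (c : Char) (h : List Char) :
    PySem.Chars.isIn pat (c :: h) = (pat.isPrefixOf (c :: h) || PySem.Chars.isIn pat h) := by
  rcases hb : pat.isPrefixOf (c :: h) with _ | _ <;> rcases hin : PySem.Chars.isIn pat h with _ | _ <;>
    simp only [Bool.false_or, Bool.true_or, Bool.or_false, Bool.or_true] <;>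
    first
    | rfl
    | skip
  · -- both false: show isIn pat (c::h) = false
    rw [← Bool.not_eq_true]
    intro hcontra
    rw [← PySem.Chars.exists_prefix_drop_iff_isIn] at hcontra
    obtain ⟨j, hj⟩ := hcontra
    cases j with
    | zero =>
      simp only [List.drop_zero] at hj
      exact absurd (List.isPrefixOf_iff_prefix.mpr hj) (by simp [hb])
    | succ j' =>
      simp only [List.drop_succ_cons] at hj
      have : PySem.Chars.isIn pat h = true :=
        (PySem.Chars.exists_prefix_drop_iff_isIn pat h).mp ⟨j', hj⟩
      simp [this] at hin
  · -- prefix false, isIn h true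
    rw [← PySem.Chars.exists_prefix_drop_iff_isIn] at hin ⊢
    obtain ⟨j, hj⟩ := hin
    exact ⟨j + 1, by simpa using hj⟩
  · -- prefix true
    rw [← PySem.Chars.exists_prefix_drop_iff_isIn]
    exact ⟨0, by simpa using List.isPrefixOf_iff_prefix.mp hb⟩
  · rw [← PySem.Chars.exists_prefix_drop_iff_isIn]
    exact ⟨0, by simpa using List.isPrefixOf_iff_prefix.mp hb⟩

lemma pvAny_cons (P : List (List Char)) (c : Char) (h : List Char) :
    P.any (fun pat => PySem.Chars.isIn pat (c :: h))
      = (P.any (fun pat => pat.isPrefixOf (c :: h)) || P.any (fun pat => PySem.Chars.isIn pat h)) := by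
  induction P with
  | nil => rfl
  | cons q Q ih =>
    simp only [List.any_cons]
    rw [ih, pvIsIn_cons]
    cases q.isPrefixOf (c :: h) <;> cases PySem.Chars.isIn q h <;>
      cases Q.any (fun pat => pat.isPrefixOf (c :: h)) <;>
      cases Q.any (fun pat => PySem.Chars.isIn pat h) <;> simp

lemma pvIsIn_nil (pat : List Char) (hp : pat ≠ []) : PySem.Chars.isIn pat [] = false := by
  rw [PySem.Chars.isIn, pvFind_eq]
  cases pat with
  | nil => exact absurd rfl hp
  | cons a b => rfl

lemma pvAnyPat_nil : pvAnyPat [] = false := by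
  unfold pvAnyPat
  rw [List.any_eq_false]
  intro pat hpat
  simp [pvIsIn_nil pat (pvPats_ok pat hpat).1]

-- the master correspondence
lemma pvMain : ∀ (n : Nat) (s : List Char), s.length = n →
    List.findIdx? pvAnyPat (PySem.Chars.splitOn s pvSep)
    = (pvFh pvPats s).map (fun p => PySem.Chars.count (s.take p) pvSep) := by
  intro n
  induction n using Nat.strong_induction_on with
  | _ n ih =>
    intro s hlen
    by_cases hsep : pvSep.isPrefixOf s
    · -- s = '<' :: 'p' :: '>' :: t
      obtain ⟨t, rfl⟩ : ∃ t, s = '<' :: 'p' :: '>' :: t := by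
        obtain ⟨u, hu⟩ := List.isPrefixOf_iff_prefix.mp hsep
        exact ⟨u, by rw [← hu]; rfl⟩
      rw [pvSplit_sep _ hsep]
      rw [List.findIdx?_cons]
      simp only [pvAnyPat_nil, Bool.false_eq_true, if_false]
      have hn : t.length + 3 = n := by simpa using hlen
      have iht := ih t.length (by omega) t rfl
      simp only [List.drop_succ_cons, List.drop_zero] at iht ⊢
      rw [iht]
      -- fh steps through the three separator characters
      have h1 : pvPats.any (fun p => p.isPrefixOf ('<' :: 'p' :: '>' :: t)) = false := by
        rw [List.any_eq_false]
        intro pat hpat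
        obtain ⟨hne, hlt, _, _⟩ := pvPats_ok pat hpat
        cases pat with
        | nil => exact absurd rfl hne
        | cons a b =>
          intro hpre
          rw [List.isPrefixOf_iff_prefix, List.cons_prefix_cons] at hpre
          exact hlt (by simp [hpre.1])
      have h2 : pvPats.any (fun p => p.isPrefixOf ('p' :: '>' :: t)) = false := by
        rw [List.any_eq_false]
        intro pat hpat
        obtain ⟨hne, _, hhp, _⟩ := pvPats_ok pat hpat
        cases pat with
        | nil => exact absurd rfl hne
        | cons a b =>
          intro hpre
          rw [List.isPrefixOf_iff_prefix, List.cons_prefix_cons] at hpre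
          exact hhp (by simp [hpre.1])
      have h3 : pvPats.any (fun p => p.isPrefixOf ('>' :: t)) = false := by
        rw [List.any_eq_false]
        intro pat hpat
        obtain ⟨hne, _, _, hhg⟩ := pvPats_ok pat hpat
        cases pat with
        | nil => exact absurd rfl hne
        | cons a b =>
          intro hpre
          rw [List.isPrefixOf_iff_prefix, List.cons_prefix_cons] at hpre
          exact hhg (by simp [hpre.1])
      rw [pvFh, if_neg (by simp [h1]), pvFh, if_neg (by simp [h2]), pvFh, if_neg (by simp [h3])]
      cases hft : pvFh pvPats t with
      | none => rfl
      | some p =>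
        simp only [Option.map_some, Option.map_map, Function.comp]
        congr 1
        -- count (take (p+1+1+1) s) = count (take p t) + 1
        have htake : List.take (p + 1 + 1 + 1) ('<' :: 'p' :: '>' :: t) = '<' :: 'p' :: '>' :: List.take p t := by
          simp [List.take_succ_cons]
        rw [htake]
        rw [pvCount_sep ('<' :: 'p' :: '>' :: List.take p t)
          (by rw [List.isPrefixOf_iff_prefix]; exact ⟨List.take p t, rfl⟩)]
        simp
    · cases s with
      | nil =>
        rw [pvSplit_nil, List.findIdx?_cons]
        simp only [pvAnyPat_nil, Bool.false_eq_true, if_false, List.findIdx?_nil, Option.map_none]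
        rw [pvFh]
        rw [if_neg]
        · rfl
        · simp only [Bool.not_eq_true, List.any_eq_false]
          intro pat hpat
          have := (pvPats_ok pat hpat).1
          cases pat with
          | nil => exact absurd rfl this
          | cons a b => simp
      | cons c t =>
        rw [pvSplit_cons c t hsep]
        cases hsp : PySem.Chars.splitOn t pvSep with
        | nil => exact absurd hsp (pvSplit_ne_nil t)
        | cons h rest =>
          have hhead := pvSplit_head t.length t rfl h rest hsp
          have hch_le : (c :: h) <+: (c :: t) := List.cons_prefix_cons.mpr ⟨rfl, hhead.1⟩
          -- KEY equivalence
          have key : (∃ pat ∈ pvPats, pat <+: (c :: t)) ↔ (∃ pat ∈ pvPats, pat <+: (c :: h)) := by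
            constructor
            · rintro ⟨pat, hpat, hpre⟩
              refine ⟨pat, hpat, ?_⟩
              by_cases hl : pat.length ≤ (c :: h).length
              · exact List.prefix_of_prefix_length_le hpre hch_le hl
              · exfalso
                push_neg at hl
                have hl' : h.length + 1 < pat.length := by simpa using hl
                cases hrest : rest with
                | nil =>
                  have ht := hhead.2.1 hrest
                  subst ht
                  have := hpre.length_le
                  omega
                | cons r rs =>
                  have hsep2 := hhead.2.2 (by rw [hrest]; simp)
                  rw [List.isPrefixOf_iff_prefix] at hsep2
                  obtain ⟨u, hu⟩ := hsep2
                  have hle : h.length ≤ t.length := hhead.1.length_le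
                  -- rebuild t around the separator occurrence after h
                  have ht' : c :: t = (c :: List.take h.length t) ++ ('<' :: 'p' :: '>' :: u) := by
                    have : t = List.take h.length t ++ List.drop h.length t :=
                      (List.take_append_drop _ t).symm
                    rw [← hu] at this
                    simp only [List.cons_append]
                    exact congrArg (c :: ·) this
                  have hlca : (c :: List.take h.length t).length = h.length + 1 := by
                    simp [List.length_take_of_le hle]
                  have hpat_eq := List.prefix_iff_eq_take.mp hpre
                  rw [ht', List.take_append, List.take_of_length_le (by rw [hlca]; omega)] at hpat_eq
                  have hk : ∃ k, pat.length - (c :: List.take h.length t).length = k + 1 := by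
                    refine ⟨pat.length - (c :: List.take h.length t).length - 1, ?_⟩
                    rw [hlca]
                    omega
                  obtain ⟨k, hk⟩ := hk
                  rw [hk, List.take_succ_cons] at hpat_eq
                  have hmem : '<' ∈ pat := by
                    rw [hpat_eq]
                    simp
                  exact (pvPats_ok pat hpat).2.1 hmem
            · rintro ⟨pat, hpat, hpre⟩
              exact ⟨pat, hpat, hpre.trans hch_le⟩
          by_cases hA0 : ∃ pat ∈ pvPats, pat <+: (c :: t)
          · -- a pattern starts right here
            obtain ⟨pat, hpat, hpre⟩ := key.mp hA0
            have hany : pvAnyPat (c :: h) = true := by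
              unfold pvAnyPat
              rw [List.any_eq_true]
              refine ⟨pat, hpat, ?_⟩
              rw [← PySem.Chars.exists_prefix_drop_iff_isIn]
              exact ⟨0, by simpa using hpre⟩
            simp only [pvConsHead, List.singleton_append, List.findIdx?_cons, hany, if_pos]
            have hany2 : pvPats.any (fun p => p.isPrefixOf (c :: t)) = true := by
              rw [List.any_eq_true]
              obtain ⟨pat', hpat', hpre'⟩ := hA0
              exact ⟨pat', hpat', List.isPrefixOf_iff_prefix.mpr hpre'⟩
            rw [pvFh, if_pos hany2]
            simp [pvCount_nil]
          · -- no pattern starts at this character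
            have hnoh : ¬ ∃ pat ∈ pvPats, pat <+: (c :: h) := fun hx => hA0 (key.mpr hx)
            have hanyeq : pvAnyPat (c :: h) = pvAnyPat h := by
              unfold pvAnyPat
              rw [pvAny_cons]
              have : pvPats.any (fun pat => pat.isPrefixOf (c :: h)) = false := by
                rw [List.any_eq_false]
                intro pat hpat hpre
                exact hnoh ⟨pat, hpat, List.isPrefixOf_iff_prefix.mp hpre⟩
              simp [this]
            have hn : t.length + 1 = n := by simpa using hlen
            have iht := ih t.length (by omega) t rfl
            rw [hsp] at iht
            simp only [pvConsHead, List.singleton_append, List.findIdx?_cons, hanyeq]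
            rw [List.findIdx?_cons] at iht
            rw [iht]
            rw [pvFh, if_neg]
            · cases hft : pvFh pvPats t with
              | none => rfl
              | some p =>
                simp only [Option.map_some, Option.map_map, Function.comp]
                congr 1
                rw [List.take_succ_cons]
                rw [pvCount_cons c (List.take p t)]
                intro hcon
                have : pvSep <+: (c :: t) := by
                  have h1 := List.isPrefixOf_iff_prefix.mp hcon
                  have h2 : (c :: List.take p t) <+: (c :: t) :=
                    List.cons_prefix_cons.mpr ⟨rfl, List.take_prefix p t⟩
                  exact h1.trans h2
                exact hsep (List.isPrefixOf_iff_prefix.mpr this)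
            · rw [Bool.not_eq_true, List.any_eq_false]
              intro pat hpat hpre
              exact hA0 ⟨pat, hpat, List.isPrefixOf_iff_prefix.mp hpre⟩

lemma pvChainLemma (i G : Int) (b1 b2 b3 b4 b5 b6 b7 b8 b9 b10 b11 b12 : Bool) :
    (if b1 then i else if b2 then i else if b3 then i else if b4 then i else if b5 then i
     else if b6 then i else if b7 then i else if b8 then i else if b9 then i else if b10 then i
     else if b11 then i else if b12 then i else G)
    = (if (b1 || b2 || b3 || b4 || b5 || b6 || b7 || b8 || b9 || b10 || b11 || b12) then i else G) := by
  cases b1 <;> cases b2 <;> cases b3 <;> cases b4 <;> cases b5 <;> cases b6 <;> cases b7 <;>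
    cases b8 <;> cases b9 <;> cases b10 <;> cases b11 <;> cases b12 <;> rfl

lemma pvGoA : ∀ (paras : List (List Char)) (k : Int),
    frontFromCourtGo (PySem.List.enumerate paras k)
    = match List.findIdx? pvAnyPat paras with
      | some j => k + j + 1
      | none => -1 := by
  intro paras
  induction paras with
  | nil => intro k; rfl
  | cons para rest ih =>
    intro k
    rw [show PySem.List.enumerate (para :: rest) k = (k, para) :: PySem.List.enumerate rest (k + 1)
        from rfl]
    rw [frontFromCourtGo]
    rw [List.findIdx?_cons]
    rw [pvChainLemma]
    have hiff : (PySem.Chars.isIn "Superior Court of Pennsylvania".toList para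
        || PySem.Chars.isIn "Supreme Court of Pennsylvania".toList para
        || PySem.Chars.isIn "Commonwealth Court of Pennsylvania".toList para
        || PySem.Chars.isIn "Court of Judicial Discipline of Pennsylvania".toList para
        || PySem.Chars.isIn "Court of Chancery of Delaware".toList para
        || PySem.Chars.isIn "Superior Court of Delaware".toList para
        || PySem.Chars.isIn "Supreme Court of Delaware".toList para
        || PySem.Chars.isIn "Family Court of Delaware".toList para
        || PySem.Chars.isIn "Delaware Court on the Judiciary".toList para
        || PySem.Chars.isIn "Court on the Judiciary of Delaware".toList para
        || (PySem.Chars.isIn "United States District Court, E.D. Pennsylvania".toList para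
          || PySem.Chars.isIn "United States District Court, E. D. Pennsylvania".toList para
          || PySem.Chars.isIn "United States District Court E. D. Pennsylvania".toList para
          || PySem.Chars.isIn "United States District Court, E. D. Pa.".toList para
          || PySem.Chars.isIn "District Court, E. D. Pennsylvania".toList para)
        || (PySem.Chars.isIn "United States District Court, D. Delaware".toList para
          || PySem.Chars.isIn "District Court, D. Delaware".toList para
          || PySem.Chars.isIn "United States District Court D. Delaware".toList para))
        = pvAnyPat para := by
      unfold pvAnyPat pvPats pvCourtNames
      simp only [List.map_cons, List.map_nil, List.any_cons, List.any_nil,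
        Bool.or_assoc, Bool.or_false]
    rw [hiff]
    by_cases h : pvAnyPat para = true
    · rw [if_pos h, if_pos h]
      norm_num
    · rw [if_neg h, if_neg h]
      rw [ih (k + 1)]
      cases List.findIdx? pvAnyPat rest <;> simp <;> ring

lemma frontFromCourt_ab : ∀ (fullText : String),
    frontFromCourt fullText = frontFromCourt_alt fullText := by
  intro fullText
  rw [frontFromCourt, frontFromCourt_alt]
  rw [show "<p>".toList = pvSep from rfl]
  rw [pvGoA, pvMain fullText.toList.length fullText.toList rfl]
  simp only [PySem.Str.find_eq, pvFind_eq]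
  have hfold := pvFold_eq fullText.toList pvPats none
  rw [show pvPats = pvCourtNames.map String.toList from rfl] at hfold
  rw [List.foldl_map] at hfold
  rw [show pvEnc none = (-1 : Int) from rfl] at hfold
  rw [hfold]
  rw [show (pvCourtNames.map String.toList).foldl
        (fun acc q => pvOmin acc (pvOFind fullText.toList q)) none
      = pvMinPos pvPats fullText.toList from rfl]
  rw [pvMinPos_eq_fh]
  cases hfh : pvFh pvPats fullText.toList with
  | none => rfl
  | some p =>
    simp only [Option.map_some, pvEnc]
    rw [if_neg (by omega)]
    rw [PySem.Str.count_eq, PySem.Str.toList_slice, PySem.Chars.slice_eq_listSlice]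
    rw [PySem.List.slice_to _ (by omega : (0:Int) ≤ (p:Int))]
    rw [show ("<p>".toList) = pvSep from rfl]
    rw [Int.toNat_natCast]
    ring

-- ===== VERDICT (by name: the statement is the Claim_ definition above) =====
theorem frontFromCourt_spec : Claim_equal_frontFromCourt := by
  intro fullText _
  exact frontFromCourt_ab fullText
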